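-- pv_equiv track=rewrite | github.com/Eamon-fox/ln2-inventory-agent | lib/overview_table_query.py | get_unique_overview_table_values
-- ===== SOURCE A (Python) =====
-- from collections import defaultdict
--
-- def get_unique_overview_table_values(rows, column_name):
--     """Return unique display values and counts for one Overview table column."""
--     value_counts = defaultdict(int)
--     for row in rows or []:
--         value = (row.get("values") or {}).get(column_name)
--         if value in (None, ""):
--             continue
--         value_counts[str(value)] += 1
--
--     return sorted(value_counts.items(), key=lambda item: (-item[1], item[0]))
-- ===== SOURCE B (Python) =====
-- def get_unique_overview_table_values(rows, column_name):
--     """Return unique display values and counts for one Overview table column."""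
--     kept = []
--     for row in rows or []:
--         value = (row.get("values") or {}).get(column_name)
--         if value in (None, ""):
--             continue
--         kept.append(str(value))
--     kept.sort()
--     pairs = []
--     i, n = 0, len(kept)
--     while i < n:
--         j = i
--         while j < n and kept[j] == kept[i]:
--             j += 1
--         pairs.append((kept[i], j - i))
--         i = j
--     return sorted(pairs, key=lambda p: (-p[1], p[0]))
-- ===== Notes on version B (the rewrite author's own statement) =====
-- stated objective: alternative
-- what changed: B has no counting dict at all: it sorts the kept stringified values and derives each (value, count) pair as a run length in the sorted list (sort-then-group), then applies the same (-count, value) final sort.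
import Mathlib
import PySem

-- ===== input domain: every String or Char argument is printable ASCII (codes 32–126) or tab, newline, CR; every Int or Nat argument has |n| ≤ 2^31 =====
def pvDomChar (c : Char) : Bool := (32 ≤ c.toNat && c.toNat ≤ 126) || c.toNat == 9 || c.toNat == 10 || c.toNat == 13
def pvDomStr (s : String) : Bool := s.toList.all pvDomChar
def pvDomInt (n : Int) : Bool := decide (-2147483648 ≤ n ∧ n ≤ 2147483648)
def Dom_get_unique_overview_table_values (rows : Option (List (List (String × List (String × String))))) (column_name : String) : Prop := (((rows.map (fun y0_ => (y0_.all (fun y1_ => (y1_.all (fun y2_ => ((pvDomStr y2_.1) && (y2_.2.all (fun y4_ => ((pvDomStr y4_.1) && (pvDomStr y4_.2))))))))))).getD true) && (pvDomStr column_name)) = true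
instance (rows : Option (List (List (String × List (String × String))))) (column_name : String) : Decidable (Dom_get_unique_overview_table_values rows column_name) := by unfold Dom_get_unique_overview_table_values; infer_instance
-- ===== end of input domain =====

-- B replaces A's dict-of-counts accumulation by sort-then-group: it sorts the kept values and
-- reads each count off as a run length (alternative decomposition, not claimed faster).

-- shared by both Pythons: value = (row.get("values") or {}).get(column_name)
def pvLookup (column_name : String) (row : List (String × List (String × String))) : Option String :=
  (PySem.Dict.ofList (((PySem.Dict.ofList row).get? "values").getD [])).get? column_name

-- ===== PORT A =====
def get_unique_overview_table_values (rows : Option (List (List (String × List (String × String))))) (column_name : String) : List (String × Int) :=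
  let value_counts := (rows.getD []).foldl
    (fun value_counts row =>
      match pvLookup column_name row with
      | none => value_counts                                 -- value is None: skip
      | some value =>
        if value = "" then value_counts                      -- value == "": skip
        else value_counts.modify value 0 (· + 1))            -- value_counts[str(value)] += 1 (str is identity on str)
    PySem.Dict.empty
  PySem.List.sorted2 value_counts.items (fun item => -item.2) (fun item => item.1)

-- ===== PORT B =====
-- the index-based grouping loop of Source B: from position i, j scans the run of kept[i],
-- one pair (kept[i], j - i) is emitted and the scan resumes at j
def pvRle : List String → List (String × Int)
  | [] => []
  | x :: xs =>
    (x, 1 + ((xs.takeWhile (· == x)).length : Int)) :: pvRle (xs.dropWhile (· == x))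
termination_by L => L.length
decreasing_by
  simpa using Nat.lt_succ_of_le (List.length_dropWhile_le _ _)

def get_unique_overview_table_values_alt (rows : Option (List (List (String × List (String × String))))) (column_name : String) : List (String × Int) :=
  let kept := (rows.getD []).foldl
    (fun kept row =>
      match pvLookup column_name row with
      | none => kept
      | some value => if value = "" then kept else kept ++ [value])
    ([] : List String)
  let keptSorted := PySem.List.sorted kept (fun k => k) false   -- kept.sort()
  let pairs := pvRle keptSorted
  PySem.List.sorted2 pairs (fun p => -p.2) (fun p => p.1)

-- ===== PRECONDITION & SPEC =====
def Spec_get_unique_overview_table_values (rows : Option (List (List (String × List (String × String))))) (column_name : String) (out : List (String × Int)) : Prop := out = get_unique_overview_table_values_alt rows column_name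
instance (rows : Option (List (List (String × List (String × String))))) (column_name : String) (out : List (String × Int)) : Decidable (Spec_get_unique_overview_table_values rows column_name out) := by unfold Spec_get_unique_overview_table_values; infer_instance

-- ===== CLAIM (what is proved, stated in full; the proofs are below) =====
def Claim_equal_get_unique_overview_table_values : Prop := ∀ (rows : Option (List (List (String × List (String × String))))) (column_name : String), Dom_get_unique_overview_table_values rows column_name → Spec_get_unique_overview_table_values rows column_name (get_unique_overview_table_values rows column_name)

-- ===== LEMMAS AND PROOFS =====

-- the strict "key" order sorted2 uses in both ports, written exactly as sorted2 builds it
def pvLt (a b : String × Int) : Bool :=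
  decide (-a.2 < -b.2) || !decide (-b.2 < -a.2) && decide (a.1 < b.1)

theorem pvLt_iff (a b : String × Int) :
    pvLt a b = true ↔ (b.2 < a.2 ∨ (b.2 ≤ a.2 ∧ a.1 < b.1)) := by
  simp [pvLt]

theorem pvLt_trans (a b c : String × Int) (h1 : pvLt a b = true) (h2 : pvLt b c = true) :
    pvLt a c = true := by
  rw [pvLt_iff] at h1 h2 ⊢
  rcases h1 with h1 | ⟨h1, h1s⟩ <;> rcases h2 with h2 | ⟨h2, h2s⟩
  · exact Or.inl (by omega)
  · exact Or.inl (by omega)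
  · exact Or.inl (by omega)
  · exact Or.inr ⟨by omega, lt_trans h1s h2s⟩

theorem pvLt_asymm (a b : String × Int) (h : pvLt a b = true) : pvLt b a = false := by
  by_contra hc
  rw [Bool.not_eq_false, pvLt_iff] at hc
  rw [pvLt_iff] at h
  rcases h with h | ⟨h, hs⟩ <;> rcases hc with hc | ⟨hc, hcs⟩
  · omega
  · omega
  · omega
  · exact absurd (lt_trans hs hcs) (lt_irrefl _)

theorem pvInsertBy_spec (x : String × Int) :
    ∀ (ys : List (String × Int)), ys.Pairwise (fun a b => pvLt a b = true) →
    (∀ y ∈ ys, pvLt x y = true ∨ pvLt y x = true) →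
    (PySem.List.insertBy pvLt x ys).Perm (x :: ys) ∧
      (PySem.List.insertBy pvLt x ys).Pairwise (fun a b => pvLt a b = true) := by
  intro ys
  induction ys with
  | nil => intro _ _; simp [PySem.List.insertBy]
  | cons y ys ih =>
    intro hpw hcomp
    rw [List.pairwise_cons] at hpw
    by_cases hxy : pvLt x y = true
    · refine ⟨by simp [PySem.List.insertBy, hxy], ?_⟩
      simp only [PySem.List.insertBy, hxy, if_true]
      refine List.pairwise_cons.2 ⟨?_, List.pairwise_cons.2 hpw⟩
      intro z hz
      rcases List.mem_cons.1 hz with hz | hz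
      · exact hz ▸ hxy
      · exact pvLt_trans _ _ _ hxy (hpw.1 z hz)
    · have hyx : pvLt y x = true := by
        rcases hcomp y (by simp) with h | h
        · exact absurd h hxy
        · exact h
      obtain ⟨hperm, hpw2⟩ := ih hpw.2 (fun z hz => hcomp z (by simp [hz]))
      simp only [PySem.List.insertBy, hxy]
      constructor
      · exact (hperm.cons y).trans (List.Perm.swap x y ys)
      · refine List.pairwise_cons.2 ⟨?_, hpw2⟩
        intro z hz
        rcases List.mem_cons.1 (hperm.mem_iff.1 hz) with h | h
        · exact h ▸ hyx
        · exact hpw.1 z h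

theorem pvFoldl_insertBy_spec :
    ∀ (xs acc : List (String × Int)),
    acc.Pairwise (fun a b => pvLt a b = true) →
    xs.Pairwise (fun a b => pvLt a b = true ∨ pvLt b a = true) →
    (∀ x ∈ xs, ∀ y ∈ acc, pvLt x y = true ∨ pvLt y x = true) →
    (xs.foldl (fun acc x => PySem.List.insertBy pvLt x acc) acc).Perm (acc ++ xs) ∧
      (xs.foldl (fun acc x => PySem.List.insertBy pvLt x acc) acc).Pairwise (fun a b => pvLt a b = true) := by
  intro xs
  induction xs with
  | nil => intro acc h _ _; exact ⟨by simp, h⟩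
  | cons x xs ih =>
    intro acc hacc hxs hcomp
    rw [List.pairwise_cons] at hxs
    obtain ⟨hperm, hpw⟩ := pvInsertBy_spec x acc hacc (fun y hy => hcomp x (by simp) y hy)
    obtain ⟨hperm2, hpw2⟩ := ih (PySem.List.insertBy pvLt x acc) hpw hxs.2 (by
      intro x' hx' y hy
      rcases List.mem_cons.1 (hperm.mem_iff.1 hy) with h | h
      · subst h
        rcases hxs.1 x' hx' with h | h
        · exact Or.inr h
        · exact Or.inl h
      · exact hcomp x' (by simp [hx']) y h)
    refine ⟨?_, hpw2⟩
    simp only [List.foldl_cons]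
    exact hperm2.trans ((hperm.append_right xs).trans List.perm_middle.symm)

-- two pvLt-strictly-sorted permutations are equal
theorem pvSorted_unique (l1 l2 : List (String × Int)) (hp : l1.Perm l2)
    (h1 : l1.Pairwise (fun a b => pvLt a b = true))
    (h2 : l2.Pairwise (fun a b => pvLt a b = true)) : l1 = l2 :=
  List.Perm.eq_of_pairwise
    (fun a b _ _ hab hba => absurd hba (by simp [pvLt_asymm a b hab])) h1 h2 hp

theorem pvSorted2_eq_foldl (xs : List (String × Int)) :
    PySem.List.sorted2 xs (fun p => -p.2) (fun p => p.1) =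
      xs.foldl (fun acc x => PySem.List.insertBy pvLt x acc) [] := rfl

-- sorted2 of two comparable-pairwise permutations agree
theorem pvSorted2_eq_of_perm (xs ys : List (String × Int)) (hp : xs.Perm ys)
    (hxs : xs.Pairwise (fun a b => pvLt a b = true ∨ pvLt b a = true)) :
    PySem.List.sorted2 xs (fun p => -p.2) (fun p => p.1) =
      PySem.List.sorted2 ys (fun p => -p.2) (fun p => p.1) := by
  have hys : ys.Pairwise (fun a b => pvLt a b = true ∨ pvLt b a = true) :=
    (List.Perm.pairwise_iff (fun {a b} h => Or.symm h) hp).1 hxs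
  obtain ⟨hpx, hwx⟩ := pvFoldl_insertBy_spec xs [] (by simp) hxs (by simp)
  obtain ⟨hpy, hwy⟩ := pvFoldl_insertBy_spec ys [] (by simp) hys (by simp)
  rw [pvSorted2_eq_foldl, pvSorted2_eq_foldl]
  refine pvSorted_unique _ _ ?_ hwx hwy
  exact (hpx.trans (by simpa using hp)).trans (by simpa using hpy.symm)

-- A's accumulation step / B's accumulation step
def pvStepA (column_name : String) (d : PySem.Dict String Int)
    (row : List (String × List (String × String))) : PySem.Dict String Int :=
  match pvLookup column_name row with
  | none => d
  | some value => if value = "" then d else d.modify value 0 (· + 1)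

def pvStepB (column_name : String) (ks : List String)
    (row : List (String × List (String × String))) : List String :=
  match pvLookup column_name row with
  | none => ks
  | some value => if value = "" then ks else ks ++ [value]

theorem pvStepB_acc (column_name : String) :
    ∀ (rs : List (List (String × List (String × String)))) (acc : List String),
    rs.foldl (pvStepB column_name) acc = acc ++ rs.foldl (pvStepB column_name) [] := by
  intro rs
  induction rs with
  | nil => simp
  | cons r rs ih =>
    intro acc
    simp only [List.foldl_cons]
    rw [ih (pvStepB column_name acc r), ih (pvStepB column_name [] r)]
    have hstep : pvStepB column_name acc r = acc ++ pvStepB column_name [] r := by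
      unfold pvStepB
      cases pvLookup column_name r with
      | none => simp
      | some v => by_cases h : v = "" <;> simp [h]
    rw [hstep, List.append_assoc]

theorem pvA_eq_counter (column_name : String) :
    ∀ (rs : List (List (String × List (String × String)))) (d : PySem.Dict String Int),
    rs.foldl (pvStepA column_name) d =
      (rs.foldl (pvStepB column_name) []).foldl (fun d x => d.modify x 0 (· + 1)) d := by
  intro rs
  induction rs with
  | nil => intro d; rfl
  | cons r rs ih =>
    intro d
    have hstep : (pvStepB column_name [] r).foldl
        (fun (d : PySem.Dict String Int) x => d.modify x 0 (· + 1)) d = pvStepA column_name d r := by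
      unfold pvStepA pvStepB
      cases pvLookup column_name r with
      | none => rfl
      | some v => by_cases h : v = "" <;> simp [h]
    simp only [List.foldl_cons]
    rw [ih (pvStepA column_name d r), pvStepB_acc column_name rs (pvStepB column_name [] r),
      List.foldl_append, hstep]

-- the pairs A sorts are pairwise pvLt-comparable
theorem pvPairs_comparable (K : List String) :
    ((PySem.Set.ofList K).map (fun k => (k, (K.count k : Int)))).Pairwise
      (fun a b => pvLt a b = true ∨ pvLt b a = true) := by
  rw [List.pairwise_map]
  refine List.Pairwise.imp ?_ (PySem.Set.nodup_ofList K)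
  intro k k' hne
  rcases lt_trichotomy ((K.count k : Int)) ((K.count k' : Int)) with h | h | h
  · exact Or.inr ((pvLt_iff _ _).2 (Or.inl h))
  · rcases lt_or_gt_of_ne hne with hs | hs
    · exact Or.inl ((pvLt_iff _ _).2 (Or.inr ⟨le_of_eq h.symm, hs⟩))
    · exact Or.inr ((pvLt_iff _ _).2 (Or.inr ⟨le_of_eq h, hs⟩))
  · exact Or.inl ((pvLt_iff _ _).2 (Or.inl h))

-- every element dropped past the run of x in a ≤-sorted list with x below it is strictly above x
theorem pvDropWhile_gt (x : String) :
    ∀ (xs : List String), xs.Pairwise (· ≤ ·) → (∀ y ∈ xs, x ≤ y) →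
    ∀ y ∈ xs.dropWhile (· == x), x < y := by
  intro xs
  induction xs with
  | nil => intro _ _ y hy; simp [List.dropWhile] at hy
  | cons a l ih =>
    intro hpw hle y hy
    rw [List.pairwise_cons] at hpw
    by_cases ha : a = x
    · subst ha
      rw [List.dropWhile_cons_of_pos (by simp)] at hy
      exact ih hpw.2 (fun z hz => hle z (by simp [hz])) y hy
    · rw [List.dropWhile_cons_of_neg (by simpa using ha)] at hy
      have hxa : x < a := lt_of_le_of_ne (hle a (by simp)) (Ne.symm ha)
      rcases List.mem_cons.1 hy with h | h
      · exact h ▸ hxa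
      · exact lt_of_lt_of_le hxa (hpw.1 y h)

-- membership in pvRle's keys = membership in the list
theorem pvRle_keys_mem : ∀ (L : List String) (k : String),
    k ∈ (pvRle L).map Prod.fst ↔ k ∈ L := by
  intro L
  induction L using pvRle.induct with
  | case1 => simp [pvRle]
  | case2 x xs ih =>
    intro k
    rw [pvRle]
    simp only [List.map_cons, List.mem_cons, ih]
    constructor
    · rintro (h | h)
      · exact Or.inl h
      · exact Or.inr ((List.dropWhile_sublist _).mem h)
    · rintro (h | h)
      · exact Or.inl h
      · rw [← List.takeWhile_append_dropWhile (p := (· == x)) (l := xs), List.mem_append] at h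
        rcases h with h | h
        · exact Or.inl (by simpa using List.mem_takeWhile_imp h)
        · exact Or.inr h

-- on a ≤-sorted list, pvRle's keys are nodup and each pair carries the total count
theorem pvRle_sorted_eq : ∀ (L : List String), L.Pairwise (· ≤ ·) →
    ((pvRle L).map Prod.fst).Nodup ∧
      pvRle L = ((pvRle L).map Prod.fst).map (fun k => (k, (L.count k : Int))) := by
  intro L
  induction L using pvRle.induct with
  | case1 => simp [pvRle]
  | case2 x xs ih =>
    intro hpw
    rw [List.pairwise_cons] at hpw
    have hd : (xs.dropWhile (· == x)).Pairwise (· ≤ ·) :=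
      hpw.2.sublist (List.dropWhile_sublist _)
    have hgt : ∀ y ∈ xs.dropWhile (· == x), x < y := pvDropWhile_gt x xs hpw.2 hpw.1
    obtain ⟨hnd, heq⟩ := ih hd
    have hxsplit : xs = xs.takeWhile (· == x) ++ xs.dropWhile (· == x) :=
      (List.takeWhile_append_dropWhile ..).symm
    have htake : ∀ y ∈ xs.takeWhile (· == x), y = x := by
      intro y hy; simpa using List.mem_takeWhile_imp hy
    constructor
    · rw [pvRle, List.map_cons]
      refine List.nodup_cons.2 ⟨?_, hnd⟩
      intro hx
      exact absurd rfl (ne_of_gt (hgt x ((pvRle_keys_mem _ x).1 hx)))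
    · rw [pvRle, List.map_cons, List.map_cons]
      have hsplitc : ∀ k : String, xs.count k =
          (xs.takeWhile (· == x)).count k + (xs.dropWhile (· == x)).count k := by
        intro k
        conv_lhs => rw [hxsplit]
        exact List.count_append ..
      congr 1
      · -- the emitted count for x is the total count of x in x :: xs
        have h1 : (xs.takeWhile (· == x)).count x = (xs.takeWhile (· == x)).length :=
          List.count_eq_length.2 (fun y hy => by simp [htake y hy])
        have h2 : (xs.dropWhile (· == x)).count x = 0 :=
          List.count_eq_zero.2 (fun hx => absurd rfl (ne_of_gt (hgt x hx)))
        have hcx : (x :: xs).count x = 1 + (xs.takeWhile (· == x)).length := by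
          rw [List.count_cons_self, hsplitc x, h1, h2]; omega
        rw [hcx]; push_cast; ring_nf
      · -- counts of later keys are unchanged by the dropped run
        conv_lhs => rw [heq]
        refine List.map_congr_left ?_
        intro k hk
        have hkmem : k ∈ xs.dropWhile (· == x) := (pvRle_keys_mem _ k).1 hk
        have hkx : x < k := hgt k hkmem
        have h0 : (xs.takeWhile (· == x)).count k = 0 :=
          List.count_eq_zero.2 (fun hkt => absurd (htake k hkt) (ne_of_lt hkx).symm)
        have : (x :: xs).count k = (xs.dropWhile (· == x)).count k := by
          rw [List.count_cons_of_ne (ne_of_lt hkx), hsplitc k, h0]; omega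
        rw [this]

-- ===== VERDICT (by name: the statement is the Claim_ definition above) =====
theorem get_unique_overview_table_values_spec : Claim_equal_get_unique_overview_table_values := by
  intro rows column_name _
  unfold Spec_get_unique_overview_table_values
  unfold get_unique_overview_table_values get_unique_overview_table_values_alt
  have hA : (rows.getD []).foldl (pvStepA column_name) (PySem.Dict.empty : PySem.Dict String Int) =
      PySem.Dict.counter ((rows.getD []).foldl (pvStepB column_name) []) := by
    rw [PySem.Dict.counter_eq_foldl]
    exact pvA_eq_counter column_name (rows.getD []) PySem.Dict.empty
  set K := (rows.getD []).foldl (pvStepB column_name) [] with hK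
  set L := PySem.List.sorted K (fun k => k) false with hL
  have hsorted : L.Pairwise (· ≤ ·) := PySem.List.sorted_pairwise K (fun k => k)
  have hperm : L.Perm K := PySem.List.sorted_perm K (fun k => k) false
  obtain ⟨hnd, heq⟩ := pvRle_sorted_eq L hsorted
  have hcount : ∀ k, L.count k = K.count k := fun k => hperm.count_eq k
  have heq' : pvRle L = ((pvRle L).map Prod.fst).map (fun k => (k, (K.count k : Int))) := by
    conv_lhs => rw [heq]
    exact List.map_congr_left (fun k _ => by rw [hcount k])
  show PySem.List.sorted2 ((rows.getD []).foldl (pvStepA column_name) PySem.Dict.empty).items _ _ =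
    PySem.List.sorted2 (pvRle L) _ _
  rw [hA, PySem.Dict.items_counter]
  apply pvSorted2_eq_of_perm
  · -- same multiset of pairs: nodup key lists with the same members, mapped by k ↦ (k, K.count k)
    have hkeys : (PySem.Set.ofList K).Perm ((pvRle L).map Prod.fst) := by
      rw [List.perm_ext_iff_of_nodup (PySem.Set.nodup_ofList K) hnd]
      intro k
      rw [pvRle_keys_mem L k, PySem.Set.mem_ofList, hperm.mem_iff]
    rw [heq']
    exact hkeys.map _
  · exact pvPairs_comparable K
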